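-- pv_equiv track=rewrite | github.com/jboone/tpms | src/bit_coding.py | differential_manchester_decode
-- ===== SOURCE A (Python) =====
-- def string_to_symbols(s, symbol_length):
-- 	return [s[n:n+symbol_length] for n in range(0, len(s), symbol_length)]
--
-- def differential_manchester_decode(s):
-- 	symbols = string_to_symbols(s, 2)
-- 	last_bit = '0'
-- 	result = []
-- 	for symbol in symbols:
-- 		if len(symbol) == 2:
-- 			if symbol[0] == symbol[1]:
-- 				result.append('X')
-- 			elif last_bit != symbol[0]:
-- 				result.append('0')
-- 			else:
-- 				result.append('1')
-- 			last_bit = symbol[1]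
-- 		else:
-- 			result.append('X')
-- 	return ''.join(result)
-- ===== SOURCE B (Python) =====
-- def differential_manchester_decode(s):
--     # Two-pass, positional: build the per-position transition flags once
--     # (each bit vs its predecessor, seeded with '0'), then consume the flags
--     # pairwise: no mid-transition -> 'X'; else start transition -> '0' else '1'.
--     t = '0' + s
--     trans = [x != y for x, y in zip(t, t[1:])]
--     out = []
--     it = iter(trans)
--     for start in it:
--         mid = next(it, None)
--         if mid is None or not mid:
--             out.append('X')
--         else:
--             out.append('0' if start else '1')
--     return ''.join(out)
-- ===== Notes on version B (the rewrite author's own statement) =====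
-- stated objective: alternative
-- what changed: Replaces the stateful loop that threads last_bit through freshly-built 2-char slices by a two-pass scheme: one pass builds per-position transition flags (each char vs its predecessor, seeded with '0'), a second pass consumes the flags pairwise; no per-symbol string slicing.
import Mathlib
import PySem

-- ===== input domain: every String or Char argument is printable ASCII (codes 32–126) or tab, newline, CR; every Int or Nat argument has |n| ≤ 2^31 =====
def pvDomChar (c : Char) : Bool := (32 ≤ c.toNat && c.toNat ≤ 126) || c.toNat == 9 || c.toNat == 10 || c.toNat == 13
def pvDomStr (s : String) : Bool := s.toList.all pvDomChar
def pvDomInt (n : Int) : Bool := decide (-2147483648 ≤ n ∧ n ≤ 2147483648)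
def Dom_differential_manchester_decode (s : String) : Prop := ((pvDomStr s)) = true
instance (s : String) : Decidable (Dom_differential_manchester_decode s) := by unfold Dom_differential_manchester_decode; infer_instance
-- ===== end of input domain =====

-- B replaces A's carried last_bit accumulator by a two-pass transition-flag scheme; alternative decomposition, same cost.

-- ===== PORT A =====
-- string_to_symbols(s, k): [s[n:n+k] for n in range(0, len(s), k)]
def pvStringToSymbols (l : List Char) (k : Int) : List (List Char) :=
  (PySem.List.pyRange 0 l.length k).map (fun n => PySem.List.slice l (some n) (some (n + k)))

-- A's loop: carries last_bit and the result list (appends at the end, as Python does)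
def pvLoopA : List (List Char) → Char → List Char → List Char
  | [], _, acc => acc
  | sym :: rest, last, acc =>
    if sym.length = 2 then
      pvLoopA rest (PySem.List.pyGetD sym 1 ' ')
        (acc ++ [if PySem.List.pyGetD sym 0 ' ' = PySem.List.pyGetD sym 1 ' ' then 'X'
                 else if last ≠ PySem.List.pyGetD sym 0 ' ' then '0' else '1'])
    else
      pvLoopA rest last (acc ++ ['X'])

def differential_manchester_decode (s : String) : String :=
  String.ofList (pvLoopA (pvStringToSymbols s.toList 2) '0' [])

-- ===== PORT B =====
-- second pass of Source B: consume the transition flags pairwise (lone leftover flag -> 'X')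
def pvPairsB : List Bool → List Char
  | [] => []
  | [_] => ['X']
  | start :: mid :: rest =>
      (if !mid then 'X' else if start then '0' else '1') :: pvPairsB rest

def differential_manchester_decode_alt (s : String) : String :=
  let t := '0' :: s.toList
  let trans := (t.zip (t.drop 1)).map (fun p => p.1 != p.2)
  String.ofList (pvPairsB trans)

-- ===== PRECONDITION & SPEC =====
def Spec_differential_manchester_decode (s : String) (out : String) : Prop := out = differential_manchester_decode_alt s
instance (s : String) (out : String) : Decidable (Spec_differential_manchester_decode s out) := by unfold Spec_differential_manchester_decode; infer_instance

-- ===== CLAIM (what is proved, stated in full; the proofs are below) =====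
def Claim_equal_differential_manchester_decode : Prop := ∀ (s : String), Dom_differential_manchester_decode s → Spec_differential_manchester_decode s (differential_manchester_decode s)

-- ===== LEMMAS AND PROOFS =====

-- proof-only structural chunking of a list into pieces of length 2
def pvChunks2 : List Char → List (List Char)
  | [] => []
  | [a] => [[a]]
  | a :: b :: rest => [a, b] :: pvChunks2 rest

lemma pyRange_two_nil (a b : Int) (h : b ≤ a) : PySem.List.pyRange a b 2 = [] := by
  rw [PySem.List.pyRange_of_pos a b (by norm_num)]
  simp [show ¬ a < b by omega]

lemma pyRange_two_cons (a b : Int) (h : a < b) :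
    PySem.List.pyRange a b 2 = a :: PySem.List.pyRange (a + 2) b 2 := by
  rw [PySem.List.pyRange_of_pos a b (by norm_num),
      PySem.List.pyRange_of_pos (a + 2) b (by norm_num)]
  by_cases h2 : a + 2 < b
  · have hcnt : (if a < b then ((b - a + 2 - 1) / 2).toNat else 0)
        = (if a + 2 < b then ((b - (a + 2) + 2 - 1) / 2).toNat else 0) + 1 := by
      simp only [if_pos h, if_pos h2]
      have he : (b - a + 2 - 1) / 2 = (b - (a + 2) + 2 - 1) / 2 + 1 := by
        have := Int.add_mul_ediv_right (b - (a + 2) + 2 - 1) 1 (show (2:Int) ≠ 0 by norm_num)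
        omega
      rw [he]
      have h0 : (0:Int) ≤ (b - (a + 2) + 2 - 1) / 2 :=
        Int.ediv_nonneg (by omega) (by norm_num)
      omega
    rw [hcnt, List.range_succ_eq_map, List.map_cons, List.map_map]
    congr 1
    · norm_num
    · apply List.map_congr_left
      intro k _
      simp [Function.comp]
      ring
  · have hcnt : (if a < b then ((b - a + 2 - 1) / 2).toNat else 0) = 1 := by
      have hb : b - a = 1 ∨ b - a = 2 := by omega
      rcases hb with hb | hb <;> simp [if_pos h, hb]
    rw [hcnt]
    simp [show ¬ a + 2 < b by omega]

-- the comprehension over range(0, len, 2) with slicing equals structural chunking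
lemma symbols_eq_chunks_aux : ∀ (l front : List Char),
    (PySem.List.pyRange (front.length : Int) ((front.length : Int) + l.length) 2).map
      (fun n => PySem.List.slice (front ++ l) (some n) (some (n + 2))) = pvChunks2 l := by
  intro l
  induction l using pvChunks2.induct with
  | case1 =>
      intro front
      rw [show ((front.length : Int) + ([] : List Char).length) = (front.length : Int) by simp]
      rw [pyRange_two_nil _ _ (le_refl _)]
      simp [pvChunks2]
  | case2 a =>
      intro front
      rw [pyRange_two_cons _ _ (by push_cast [List.length_cons, List.length_nil]; omega)]
      rw [pyRange_two_nil _ _ (by push_cast [List.length_cons, List.length_nil]; omega)]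
      simp only [List.map_cons, List.map_nil, pvChunks2]
      congr 1
      rw [show ((front.length : Int) + 2) = ((front.length : Int) + ((2 : Nat) : Int)) by norm_num,
          PySem.List.slice_natCast_add, List.drop_left]
      rfl
  | case3 a b rest ih =>
      intro front
      rw [pyRange_two_cons _ _ (by push_cast [List.length_cons, List.length_nil]; omega)]
      simp only [List.map_cons, pvChunks2]
      congr 1
      · rw [show ((front.length : Int) + 2) = ((front.length : Int) + ((2 : Nat) : Int)) by norm_num,
            PySem.List.slice_natCast_add, List.drop_left]
        rfl
      · have h1 : ((front ++ [a, b]).length : Int) = (front.length : Int) + 2 := by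
          simp
        have h2 : (front ++ [a, b]) ++ rest = front ++ a :: b :: rest := by simp
        have h3 := ih (front ++ [a, b])
        rw [h1, h2] at h3
        have h4 : (front.length : Int) + ((a :: b :: rest).length : Int)
            = ((front.length : Int) + 2) + (rest.length : Int) := by
          simp only [List.length_cons]
          push_cast
          omega
        rw [h4]
        exact h3

lemma symbols_eq_chunks (l : List Char) : pvStringToSymbols l 2 = pvChunks2 l := by
  have := symbols_eq_chunks_aux l []
  simpa [pvStringToSymbols] using this

-- A's stateful loop equals B's pairwise consumption of the transition flags
lemma loop_eq : ∀ (l : List Char) (p : Char) (acc : List Char),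
    pvLoopA (pvChunks2 l) p acc
      = acc ++ pvPairsB (((p :: l).zip l).map (fun q => q.1 != q.2)) := by
  intro l
  induction l using pvChunks2.induct with
  | case1 => intro p acc; simp [pvChunks2, pvLoopA, pvPairsB]
  | case2 a => intro p acc; simp [pvChunks2, pvLoopA, pvPairsB]
  | case3 a b rest ih =>
      intro p acc
      simp only [pvChunks2, pvLoopA, List.zip_cons_cons, List.map_cons, pvPairsB]
      rw [if_pos (by simp)]
      rw [ih]
      simp only [PySem.List.pyGetD]
      norm_num [PySem.List.pyIdx?, PySem.List.pyGet?]

-- ===== VERDICT (by name: the statement is the Claim_ definition above) =====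
theorem differential_manchester_decode_spec : Claim_equal_differential_manchester_decode := by
  intro s _
  unfold Spec_differential_manchester_decode differential_manchester_decode differential_manchester_decode_alt
  rw [symbols_eq_chunks, loop_eq]
  simp
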